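-- pv_equiv track=rewrite | github.com/BosshammerXD/KV-LaTex-Maker | src/KV_Utils.py | IndexToCoordinate
-- ===== SOURCE A (Python) =====
-- import math
--
-- def IndexToCoordinate(index: int, n: int) -> tuple[int, int]:
--     if n < 1:
--         raise ValueError("Number of variables must be at least 1")
--     elif index < 0 or index >= 2**n:
--         raise ValueError(f"Index out of bounds. index: {index}, n: {n}")
--     elif n == 1:
--         return (0, index - 1)
--
--     # Convert the index to binary
--     binary: str = bin(index)[2:].zfill(n)[::-1]
--
--     col_bits: str = "".join(binary[i] for i in range(0, n, 2)).zfill(math.ceil(n/2))[::-1]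
--     row_bits: str = "".join(binary[i] for i in range(1, n, 2)).zfill(math.floor(n/2))[::-1]
--
--     possible_x: list[int] = list(range(2**math.ceil(n/2)))
--     possible_y: list[int] = list(range(2**math.floor(n/2)))
--
--     last: int = 0
--     for c in col_bits:
--         v = int(c)
--         if v ^last == 1:
--             possible_x = possible_x[len(possible_x)//2:]
--         else:
--             possible_x = possible_x[:len(possible_x)//2]
--
--         last ^= v
--
--     last: int = 0
--     for c in row_bits:
--         v = int(c)
--         if v ^ last == 1:
--             possible_y = possible_y[len(possible_y)//2:]
--         else:
--             possible_y = possible_y[:len(possible_y)//2]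
--
--         last ^= v
--
--     if len(possible_x) == 0 or len(possible_y) == 0:
--         raise ValueError("No possible coordinates found")
--     elif len(possible_x) != 1 or len(possible_y) != 1:
--         raise ValueError("More than one possible coordinate found")
--
--     return possible_x[0], possible_y[0]
-- ===== SOURCE B (Python) =====
-- def IndexToCoordinate(index: int, n: int) -> tuple[int, int]:
--     if n < 1:
--         raise ValueError("Number of variables must be at least 1")
--     elif index < 0 or index >= 2**n:
--         raise ValueError(f"Index out of bounds. index: {index}, n: {n}")
--     elif n == 1:
--         return (0, index - 1)
--     # Gray-to-binary decode directly on the interleaved bits: even bit positions of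
--     # `index` form the column Gray code (MSB first when read downwards), odd positions
--     # the row Gray code.  A running XOR converts Gray to binary in one O(n) pass.
--     x_start = n - 1 if (n - 1) % 2 == 0 else n - 2   # highest even bit position < n
--     y_start = n - 1 if (n - 1) % 2 == 1 else n - 2   # highest odd bit position < n
--     return (_gray_decode(index, x_start), _gray_decode(index, y_start))
--
--
-- def _gray_decode(index: int, start: int) -> int:
--     val = 0
--     acc = 0
--     for k in range(start // 2 + 1):
--         acc ^= (index // 2 ** (start - 2 * k)) % 2
--         val = 2 * val + acc
--     return val
-- ===== Notes on version B (the rewrite author's own statement) =====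
-- stated objective: faster
-- what changed: B decodes the column/row Gray codes directly with a running-XOR Gray-to-binary pass over the bits of index (O(n) arithmetic), instead of A's building the full lists range(2**ceil(n/2)) / range(2**floor(n/2)) from binary-string plumbing and repeatedly slicing the lists in half. Pre_ is exactly A's non-raising domain: n >= 1 and 0 <= index < 2**n.
import Mathlib
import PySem

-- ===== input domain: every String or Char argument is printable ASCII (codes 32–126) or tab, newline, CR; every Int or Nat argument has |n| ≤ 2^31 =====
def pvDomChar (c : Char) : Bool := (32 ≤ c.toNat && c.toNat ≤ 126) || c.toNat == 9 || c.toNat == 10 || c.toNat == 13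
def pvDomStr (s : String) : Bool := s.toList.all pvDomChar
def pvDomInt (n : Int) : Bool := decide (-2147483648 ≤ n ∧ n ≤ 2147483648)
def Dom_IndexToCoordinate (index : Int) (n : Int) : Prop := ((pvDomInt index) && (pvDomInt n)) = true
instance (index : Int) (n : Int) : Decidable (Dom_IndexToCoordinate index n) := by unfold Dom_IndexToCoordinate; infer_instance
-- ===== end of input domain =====

-- B replaces A's exponentially large range-list halving by a direct O(n) running-XOR
-- Gray-to-binary decode of the even/odd bits of `index` (return value only; neither raises inside Pre_).

-- ===== PORT A =====

-- str.zfill(k) for a sign-free digit string: left-pad with '0' to length k (exact for our '0'/'1' strings)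
def pvZfill (k : Nat) (s : List Char) : List Char :=
  List.replicate (k - s.length) '0' ++ s

-- int(c) for a single digit character c ∈ {'0','1'} (the only characters that occur here)
def pvIntOfDigit (c : Char) : Int := (c.toNat : Int) - 48

-- one iteration of A's halving loop: v = int(c); slice to upper/lower half; last ^= v
def pvHalveStep (s : List Int × Int) (c : Char) : List Int × Int :=
  let v := pvIntOfDigit c
  (if PySem.Int.bxor v s.2 = 1 then
     PySem.List.slice s.1 (some (PySem.Int.floordiv (s.1.length : Int) 2)) none
   else
     PySem.List.slice s.1 none (some (PySem.Int.floordiv (s.1.length : Int) 2)),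
   PySem.Int.bxor s.2 v)

def IndexToCoordinate (index : Int) (n : Int) : Int × Int :=
  if n < 1 then (0, 0)                                     -- raise ValueError (excluded by Pre_)
  else if index < 0 ∨ (2:Int) ^ n.toNat ≤ index then (0, 0) -- raise ValueError (excluded by Pre_; n ≥ 1 here so 2**n = 2^n.toNat)
  else if n = 1 then (0, index - 1)
  else
    -- binary = bin(index)[2:].zfill(n)[::-1]; index ≥ 0 here, so bin(index)[2:] = PySem.Int.toBinChars index
    let binary : List Char := (pvZfill n.toNat (PySem.Int.toBinChars index)).reverse
    -- math.ceil(n/2) = (n+1)//2 and math.floor(n/2) = n//2 exactly (|n| ≤ 2^31 < 2^53, so the float n/2 is exact)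
    let colBits : List Char :=
      (pvZfill (PySem.Int.floordiv (n + 1) 2).toNat
        ((PySem.List.pyRange 0 n 2).map (fun i => PySem.List.pyGetD binary i '0'))).reverse
    let rowBits : List Char :=
      (pvZfill (PySem.Int.floordiv n 2).toNat
        ((PySem.List.pyRange 1 n 2).map (fun i => PySem.List.pyGetD binary i '0'))).reverse
    let possibleX := PySem.List.pyRange 0 ((2:Int) ^ (PySem.Int.floordiv (n + 1) 2).toNat) 1
    let possibleY := PySem.List.pyRange 0 ((2:Int) ^ (PySem.Int.floordiv n 2).toNat) 1
    let rx := colBits.foldl pvHalveStep (possibleX, 0)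
    let ry := rowBits.foldl pvHalveStep (possibleY, 0)
    match rx.1, ry.1 with
    | [x], [y] => (x, y)
    | _, _ => (0, 0)                                        -- the two final raise branches (never reached inside Pre_)

-- ===== PORT B =====

-- _gray_decode(index, start): running-XOR Gray-to-binary decode of bits start, start-2, …, of index
def pvGrayDecode (index : Int) (start : Int) : Int :=
  ((PySem.List.pyRange 0 (PySem.Int.floordiv start 2 + 1) 1).foldl
    (fun (s : Int × Int) k =>
      -- exponent start - 2*k is ≥ 0 throughout the loop, so .toNat is exact
      let acc := PySem.Int.bxor s.2
        (PySem.Int.mod (PySem.Int.floordiv index ((2:Int) ^ (start - 2 * k).toNat)) 2)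
      (2 * s.1 + acc, acc)) (0, 0)).1

def IndexToCoordinate_alt (index : Int) (n : Int) : Int × Int :=
  if n < 1 then (0, 0)                                     -- raise ValueError (excluded by Pre_)
  else if index < 0 ∨ (2:Int) ^ n.toNat ≤ index then (0, 0) -- raise ValueError (excluded by Pre_)
  else if n = 1 then (0, index - 1)
  else
    let xStart := if PySem.Int.mod (n - 1) 2 = 0 then n - 1 else n - 2
    let yStart := if PySem.Int.mod (n - 1) 2 = 1 then n - 1 else n - 2
    (pvGrayDecode index xStart, pvGrayDecode index yStart)

-- ===== PRECONDITION & SPEC =====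

-- Pre_ is exactly the inputs on which the Python A returns normally (no exception):
-- n ≥ 1 and 0 ≤ index < 2**n; everywhere outside, A raises ValueError.
def Pre_IndexToCoordinate (index : Int) (n : Int) : Prop :=
  1 ≤ n ∧ 0 ≤ index ∧ index < (2:Int) ^ n.toNat
instance (index : Int) (n : Int) : Decidable (Pre_IndexToCoordinate index n) := by
  unfold Pre_IndexToCoordinate; infer_instance

def pvWitness_IndexToCoordinate : Int × Int := (6, 3)

def Spec_IndexToCoordinate (index : Int) (n : Int) (out : Int × Int) : Prop := out = IndexToCoordinate_alt index n
instance (index : Int) (n : Int) (out : Int × Int) : Decidable (Spec_IndexToCoordinate index n out) := by unfold Spec_IndexToCoordinate; infer_instance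

-- ===== CLAIM (what is proved, stated in full; the proofs are below) =====
def Claim_equal_IndexToCoordinate : Prop := ∀ (index : Int) (n : Int), Dom_IndexToCoordinate index n → Pre_IndexToCoordinate index n → Spec_IndexToCoordinate index n (IndexToCoordinate index n)

-- ===== LEMMAS AND PROOFS =====


def pvLsb (m : Nat) : List Char :=
  Nat.digitChar (m % 2) :: (if m < 2 then [] else pvLsb (m / 2))
decreasing_by exact Nat.div_lt_self (by omega) (by omega)

theorem pvLsb_toDigitsCore (f : Nat) : ∀ (m : Nat) (acc : List Char), 1 ≤ f → m < 2 ^ f →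
    Nat.toDigitsCore 2 f m acc = (pvLsb m).reverse ++ acc := by
  induction f with
  | zero => omega
  | succ f ih =>
    intro m acc _ hm
    rw [Nat.toDigitsCore]
    by_cases h2 : m < 2
    · have hd : m / 2 = 0 := by omega
      rw [pvLsb]
      simp [hd, h2]
    · have hd : ¬ m / 2 = 0 := by omega
      have hf : 1 ≤ f := by
        rcases Nat.eq_zero_or_pos f with rfl | hf
        · norm_num at hm; omega
        · exact hf
      have hlt : m / 2 < 2 ^ f := by
        have : m < 2 ^ f * 2 := by rw [← pow_succ]; exact hm
        omega
      simp only [hd, if_false]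
      rw [ih (m / 2) _ hf hlt]
      conv_rhs => rw [pvLsb]
      simp [h2, List.append_assoc]

theorem pvLsb_toDigits (m : Nat) : Nat.toDigits 2 m = (pvLsb m).reverse := by
  have := pvLsb_toDigitsCore (m + 1) m [] (by omega) (by
    calc m < m + 1 := by omega
    _ ≤ 2 ^ (m + 1) := by exact Nat.le_of_lt (Nat.lt_two_pow_self))
  simpa [Nat.toDigits] using this

theorem pvLsb_pad (n' : Nat) (h1 : 1 ≤ n') : ∀ m : Nat, m < 2 ^ n' →
    pvLsb m ++ List.replicate (n' - (pvLsb m).length) '0'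
      = (List.range n').map (fun i => Nat.digitChar (m / 2 ^ i % 2)) := by
  induction n', h1 using Nat.le_induction with
  | base =>
    intro m hm
    rw [pvLsb]
    have h2 : m < 2 := by simpa using hm
    simp [h2, List.range_one]
  | succ n' hn' ih =>
    intro m hm
    have hrange : (List.range (n' + 1)).map (fun i => Nat.digitChar (m / 2 ^ i % 2))
        = Nat.digitChar (m % 2) :: (List.range n').map (fun i => Nat.digitChar (m / 2 / 2 ^ i % 2)) := by
      rw [List.range_succ_eq_map]
      simp only [List.map_cons, List.map_map]
      congr 1
      · simp
      · apply List.map_congr_left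
        intro i _
        simp [Function.comp, pow_succ, Nat.div_div_eq_div_mul]
        congr 2
        ring_nf
    have hm2 : m / 2 < 2 ^ n' := by
      have : m < 2 ^ n' * 2 := by rw [← pow_succ]; exact hm
      omega
    rw [hrange, ← ih (m / 2) hm2]
    rw [pvLsb]
    by_cases h2 : m < 2
    · have hd : m / 2 = 0 := by omega
      rw [hd]
      rw [pvLsb]
      simp [h2]
      have hn : n' = (n' - 1) + 1 := by omega
      rw [hn]
      simp [List.replicate_succ]
      rfl
    · simp only [h2, if_false]
      have hlen : (Nat.digitChar (m % 2) :: pvLsb (m / 2)).length = (pvLsb (m / 2)).length + 1 := by simp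
      rw [hlen]
      simp [Nat.succ_sub_succ]

def pvRg (a : Int) (c : Nat) : List Int := (List.range (2 ^ c)).map (fun j : Nat => a + (j : Int))

theorem pvRg_length (a : Int) (c : Nat) : (pvRg a c).length = 2 ^ c := by
  simp [pvRg]

theorem pvRg_split (a : Int) (c : Nat) : pvRg a (c + 1) = pvRg a c ++ pvRg (a + 2 ^ c) c := by
  unfold pvRg
  rw [show (2 : Nat) ^ (c + 1) = 2 ^ c + 2 ^ c by ring, List.range_add, List.map_append, List.map_map]
  congr 1
  apply List.map_congr_left
  intro j _
  simp [Function.comp]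
  ring

theorem pvHalf (c : Nat) :
    PySem.Int.floordiv ((2 ^ (c + 1) : Nat) : Int) 2 = ((2 ^ c : Nat) : Int) := by
  have h := PySem.Int.floordiv_natCast (2 ^ (c + 1)) 2
  have h2 : ((2 : Nat) : Int) = (2 : Int) := by norm_num
  rw [h2] at h
  rw [h]
  congr 1
  omega

theorem pvDropHalf (a : Int) (c : Nat) :
    PySem.List.slice (pvRg a (c + 1))
      (some (PySem.Int.floordiv ((pvRg a (c + 1)).length : Int) 2)) none
      = pvRg (a + 2 ^ c) c := by
  rw [pvRg_length, pvHalf, PySem.List.slice_from_natCast]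
  rw [pvRg_split, ← pvRg_length a c, List.drop_left]

theorem pvTakeHalf (a : Int) (c : Nat) :
    PySem.List.slice (pvRg a (c + 1)) none
      (some (PySem.Int.floordiv ((pvRg a (c + 1)).length : Int) 2)) = pvRg a c := by
  rw [pvRg_length, pvHalf, PySem.List.slice_to_natCast]
  rw [pvRg_split, ← pvRg_length a c, List.take_left]

def pvBStep (s : Int × Int) (g : Int) : Int × Int :=
  let acc := PySem.Int.bxor s.2 g
  (2 * s.1 + acc, acc)

theorem pvBStep_shift (vs : List Nat) : ∀ (val acc : Int),
    vs.foldl (fun (s : Int × Int) (v : Nat) => pvBStep s (v : Int)) (val, acc)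
      = (val * 2 ^ vs.length
            + (vs.foldl (fun (s : Int × Int) (v : Nat) => pvBStep s (v : Int)) (0, acc)).1,
         (vs.foldl (fun (s : Int × Int) (v : Nat) => pvBStep s (v : Int)) (0, acc)).2) := by
  induction vs with
  | nil => intro val acc; simp
  | cons v vs ih =>
    intro val acc
    have h1 : pvBStep (val, acc) (v : Int)
        = (2 * val + PySem.Int.bxor acc v, PySem.Int.bxor acc v) := rfl
    have h2 : pvBStep (0, acc) (v : Int)
        = (2 * 0 + PySem.Int.bxor acc v, PySem.Int.bxor acc v) := rfl
    simp only [List.foldl_cons]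
    rw [h1, h2, ih (2 * val + PySem.Int.bxor acc v) (PySem.Int.bxor acc v),
      ih (2 * 0 + PySem.Int.bxor acc v) (PySem.Int.bxor acc v)]
    refine Prod.ext ?_ ?_ <;> simp [List.length_cons]
    ring

def pvDec (bs : List Nat) : Int :=
  (bs.foldl (fun (s : Int × Int) (v : Nat) => pvBStep s (v : Int)) (0, 0)).1

theorem pvStep_eq (a : Int) (c : Nat) (v l : Nat) (hv : v < 2) (hl : l < 2) :
    pvHalveStep (pvRg a (c + 1), (l : Int)) (Nat.digitChar v)
      = (pvRg (a + ((l ^^^ v : Nat) : Int) * 2 ^ c) c, ((l ^^^ v : Nat) : Int)) := by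
  interval_cases v <;> interval_cases l <;> simp only [pvHalveStep]
  · rw [show ((0 ^^^ 0 : Nat)) = 0 from by decide, if_neg (by decide), pvTakeHalf,
      show PySem.Int.bxor (((0 : Nat)) : Int) (pvIntOfDigit (Nat.digitChar 0)) = (((0 : Nat)) : Int) from by decide]
    norm_num
  · rw [show ((1 ^^^ 0 : Nat)) = 1 from by decide, if_pos (by decide), pvDropHalf,
      show PySem.Int.bxor (((1 : Nat)) : Int) (pvIntOfDigit (Nat.digitChar 0)) = (((1 : Nat)) : Int) from by decide]
    norm_num
  · rw [show ((0 ^^^ 1 : Nat)) = 1 from by decide, if_pos (by decide), pvDropHalf,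
      show PySem.Int.bxor (((0 : Nat)) : Int) (pvIntOfDigit (Nat.digitChar 1)) = (((1 : Nat)) : Int) from by decide]
    norm_num
  · rw [show ((1 ^^^ 1 : Nat)) = 0 from by decide, if_neg (by decide), pvTakeHalf,
      show PySem.Int.bxor (((1 : Nat)) : Int) (pvIntOfDigit (Nat.digitChar 1)) = (((0 : Nat)) : Int) from by decide]
    norm_num

theorem pvCore (vs : List Nat) : (∀ v ∈ vs, v < 2) → ∀ (a : Int) (l : Nat), l < 2 →
    vs.foldl (fun s v => pvHalveStep s (Nat.digitChar v)) (pvRg a vs.length, (l : Int))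
      = ([a + (vs.foldl (fun (s : Int × Int) (v : Nat) => pvBStep s (v : Int)) (0, (l : Int))).1],
         (vs.foldl (fun (s : Int × Int) (v : Nat) => pvBStep s (v : Int)) (0, (l : Int))).2) := by
  induction vs with
  | nil =>
    intro _ a l _
    simp [pvRg, List.range_one]
  | cons v vs ih =>
    intro hv a l hl
    have hv2 : v < 2 := hv v List.mem_cons_self
    have hv' : ∀ w ∈ vs, w < 2 := fun w hw => hv w (List.mem_cons_of_mem v hw)
    have hb : PySem.Int.bxor (l : Int) (v : Int) = ((l ^^^ v : Nat) : Int) := by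
      interval_cases v <;> interval_cases l <;> decide
    have hxv : l ^^^ v < 2 := by interval_cases v <;> interval_cases l <;> decide
    simp only [List.foldl_cons, List.length_cons]
    rw [pvStep_eq a vs.length v l hv2 hl]
    rw [ih hv' (a + ((l ^^^ v : Nat) : Int) * 2 ^ vs.length) (l ^^^ v) hxv]
    have hstep : pvBStep (0, (l : Int)) (v : Int)
        = (((l ^^^ v : Nat) : Int), ((l ^^^ v : Nat) : Int)) := by
      simp only [pvBStep]
      rw [hb]
      norm_num
    rw [hstep, pvBStep_shift vs (((l ^^^ v : Nat)) : Int) (((l ^^^ v : Nat)) : Int)]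
    refine Prod.ext ?_ ?_ <;> simp [add_assoc]

theorem pvRevMapRange {α : Type} (c : Nat) (f : Nat → α) :
    ((List.range c).map f).reverse = (List.range c).map (fun k => f (c - 1 - k)) := by
  rw [← List.map_reverse]
  have hrev : (List.range c).reverse = (List.range c).map (fun x => c - 1 - x) := by
    conv_lhs => rw [List.range_eq_range']
    rw [List.reverse_range']
    simp
  rw [hrev, List.map_map]
  apply List.map_congr_left
  intro k _
  simp [Function.comp]

theorem pvBinary (n' m : Nat) (h1 : 1 ≤ n') (hm : m < 2 ^ n') :
    (pvZfill n' (PySem.Int.toBinChars (m : Int))).reverse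
      = (List.range n').map (fun i => Nat.digitChar (m / 2 ^ i % 2)) := by
  have ht : PySem.Int.toBinChars (m : Int) = Nat.toDigits 2 m := by
    simp [PySem.Int.toBinChars, not_lt.mpr (Int.natCast_nonneg m)]
  rw [ht, pvLsb_toDigits]
  unfold pvZfill
  rw [List.reverse_append, List.reverse_reverse, List.reverse_replicate, List.length_reverse]
  exact pvLsb_pad n' h1 m hm

theorem pvAxisA (n' m cnt off : Nat) (hn : 2 ≤ n') (hm : m < 2 ^ n') (hoff : off ≤ 1)
    (hcnt : cnt = (n' + 1 - off) / 2) :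
    (((pvZfill cnt ((PySem.List.pyRange (off : Int) (n' : Int) 2).map
        (fun i => PySem.List.pyGetD ((pvZfill n' (PySem.Int.toBinChars (m : Int))).reverse) i '0'))).reverse).foldl
      pvHalveStep (PySem.List.pyRange 0 ((2 : Int) ^ cnt) 1, 0)).1
      = [pvDec ((List.range cnt).map (fun k => m / 2 ^ (2 * (cnt - 1 - k) + off) % 2))] := by
  have hcnt1 : 1 ≤ cnt := by omega
  have hpos : ∀ k, k < cnt → 2 * k + off < n' := by omega
  have hr2 : PySem.List.pyRange (off : Int) (n' : Int) 2
      = (List.range cnt).map (fun k : Nat => (off : Int) + 2 * (k : Int)) := by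
    rw [PySem.List.pyRange_of_pos _ _ (by norm_num)]
    congr 1
    rw [if_pos (by exact_mod_cast by omega : (off : Int) < (n' : Int))]
    have hc : ((n' : Int) - (off : Int) + 2 - 1) / 2 = (cnt : Int) := by omega
    rw [hc, Int.toNat_natCast]
  have hb := pvBinary n' m (by omega) hm
  have hL : (PySem.List.pyRange (off : Int) (n' : Int) 2).map
        (fun i => PySem.List.pyGetD ((pvZfill n' (PySem.Int.toBinChars (m : Int))).reverse) i '0')
      = (List.range cnt).map (fun k => Nat.digitChar (m / 2 ^ (2 * k + off) % 2)) := by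
    rw [hr2, hb, List.map_map]
    apply List.map_congr_left
    intro k hk
    have hk' : k < cnt := List.mem_range.mp hk
    simp only [Function.comp]
    rw [show (off : Int) + 2 * (k : Int) = ((2 * k + off : Nat) : Int) from by push_cast; ring,
      PySem.List.pyGetD_natCast]
    rw [PySem.List.getD_map_range _ _ _ _ (hpos k hk')]
  have hinit : PySem.List.pyRange 0 ((2 : Int) ^ cnt) 1 = pvRg 0 cnt := by
    rw [PySem.List.pyRange_one]
    unfold pvRg
    congr 1
  rw [hL, pvZfill, List.length_map, List.length_range, Nat.sub_self, List.replicate_zero,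
    List.nil_append, pvRevMapRange, hinit]
  rw [show (fun k => Nat.digitChar (m / 2 ^ (2 * (cnt - 1 - k) + off) % 2))
      = (Nat.digitChar ∘ fun k => m / 2 ^ (2 * (cnt - 1 - k) + off) % 2) from rfl,
    ← List.map_map, List.foldl_map]
  have hlenvs : ((List.range cnt).map fun k => m / 2 ^ (2 * (cnt - 1 - k) + off) % 2).length = cnt := by
    simp
  rw [show pvRg 0 cnt = pvRg 0 ((List.range cnt).map fun k => m / 2 ^ (2 * (cnt - 1 - k) + off) % 2).length
    from by rw [hlenvs]]
  have hvs : ∀ v ∈ (List.range cnt).map (fun k => m / 2 ^ (2 * (cnt - 1 - k) + off) % 2), v < 2 := by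
    intro v hv
    obtain ⟨k, _, rfl⟩ := List.mem_map.mp hv
    exact Nat.mod_lt _ (by omega)
  have hc := pvCore ((List.range cnt).map (fun k => m / 2 ^ (2 * (cnt - 1 - k) + off) % 2)) hvs 0 0
    (by omega)
  rw [Nat.cast_zero] at hc
  rw [hc]
  simp [pvDec]

theorem pvAxisB (m cnt off : Nat) (hcnt : 1 ≤ cnt) (hoff : off ≤ 1) (s : Int)
    (hs : s = 2 * (cnt : Int) + (off : Int) - 2) :
    pvGrayDecode (m : Int) s
      = pvDec ((List.range cnt).map (fun k => m / 2 ^ (2 * (cnt - 1 - k) + off) % 2)) := by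
  subst hs
  unfold pvGrayDecode
  have hfd : PySem.Int.floordiv (2 * (cnt : Int) + (off : Int) - 2) 2 + 1 = (cnt : Int) := by
    rw [PySem.Int.floordiv_eq_ediv_of_pos (by norm_num)]
    omega
  rw [hfd, PySem.List.pyRange_one, show ((cnt : Int) - 0).toNat = cnt from by omega,
    List.foldl_map]
  rw [PySem.List.foldl_congr_mem _ _
    (fun (st : Int × Int) (k : Nat) => pvBStep st ((m / 2 ^ (2 * (cnt - 1 - k) + off) % 2 : Nat) : Int)) _
    (by
      intro acc k hk
      have hk' : k < cnt := List.mem_range.mp hk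
      have he : (2 * (cnt : Int) + (off : Int) - 2 - 2 * (0 + (k : Int))).toNat
          = 2 * (cnt - 1 - k) + off := by omega
      rw [he]
      rw [show (2 : Int) ^ (2 * (cnt - 1 - k) + off) = ((2 ^ (2 * (cnt - 1 - k) + off) : Nat) : Int)
        from by push_cast; ring]
      rw [show ((m : Int)) = ((m : Nat) : Int) from rfl, PySem.Int.floordiv_natCast]
      rw [show ((2 : Int)) = ((2 : Nat) : Int) from by norm_num, PySem.Int.mod_natCast]
      rfl)]
  unfold pvDec
  rw [List.foldl_map]

-- ===== VERDICT (by name: the statement is the Claim_ definition above) =====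
theorem IndexToCoordinate_spec : Claim_equal_IndexToCoordinate := by
  intro index n hdom hpre
  unfold Spec_IndexToCoordinate
  obtain ⟨hn1, hi0, hiu⟩ := hpre
  obtain ⟨n', rfl⟩ : ∃ k : Nat, n = (k : Int) := ⟨n.toNat, (Int.toNat_of_nonneg (by omega)).symm⟩
  obtain ⟨m, rfl⟩ : ∃ k : Nat, index = (k : Int) := ⟨index.toNat, (Int.toNat_of_nonneg hi0).symm⟩
  have hn'1 : 1 ≤ n' := by exact_mod_cast hn1
  have hp2 : ((2 ^ n' : Nat) : Int) = (2 : Int) ^ n' := by push_cast; ring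
  have hmn : m < 2 ^ n' := by
    rw [Int.toNat_natCast, ← hp2] at hiu
    exact_mod_cast hiu
  have hc1 : ¬ ((n' : Int) < 1) := by omega
  have hc2 : ¬ ((m : Int) < 0 ∨ (2 : Int) ^ ((n' : Int)).toNat ≤ (m : Int)) := by
    rw [Int.toNat_natCast, ← hp2]
    rw [not_or, not_lt, not_le]
    exact ⟨by positivity, by exact_mod_cast hmn⟩
  unfold IndexToCoordinate IndexToCoordinate_alt
  simp only [if_neg hc1, if_neg hc2]
  by_cases hone : n' = 1
  · subst hone
    norm_num
  · have hc3 : ¬ ((n' : Int) = 1) := by exact_mod_cast hone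
    have hn2 : 2 ≤ n' := by omega
    simp only [if_neg hc3]
    have hw1 : (PySem.Int.floordiv ((n' : Int) + 1) 2).toNat = (n' + 1) / 2 := by
      rw [show ((n' : Int) + 1) = ((n' + 1 : Nat) : Int) from by push_cast; ring,
        show (2 : Int) = ((2 : Nat) : Int) from by norm_num,
        PySem.Int.floordiv_natCast, Int.toNat_natCast]
    have hw2 : (PySem.Int.floordiv ((n' : Int)) 2).toNat = n' / 2 := by
      rw [show (2 : Int) = ((2 : Nat) : Int) from by norm_num,
        PySem.Int.floordiv_natCast, Int.toNat_natCast]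
    have hx := pvAxisA n' m ((n' + 1) / 2) 0 hn2 hmn (by omega) (by omega)
    have hy := pvAxisA n' m (n' / 2) 1 hn2 hmn (by omega) (by omega)
    simp only [Nat.cast_zero, Nat.cast_one] at hx hy
    have hm2 : PySem.Int.mod ((n' : Int) - 1) 2 = (((n' - 1) % 2 : Nat) : Int) := by
      rw [show ((n' : Int) - 1) = ((n' - 1 : Nat) : Int) from by
          push_cast [Nat.cast_sub hn'1]; ring,
        show (2 : Int) = ((2 : Nat) : Int) from by norm_num, PySem.Int.mod_natCast]
    simp only [hw1, hw2, Int.toNat_natCast, hm2]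
    rw [hx, hy]
    by_cases hpar : (n' - 1) % 2 = 0
    · have hbx := pvAxisB m ((n' + 1) / 2) 0 (by omega) (by omega) ((n' : Int) - 1) (by
        push_cast
        omega)
      have hby := pvAxisB m (n' / 2) 1 (by omega) (by omega) ((n' : Int) - 2) (by
        push_cast
        omega)
      simp only [] at hbx hby
      simp only [hpar, Nat.cast_zero, if_true,
        if_neg (by norm_num : ¬ ((0 : Int) = 1))]
      rw [hbx, hby]
    · have hpar1 : (n' - 1) % 2 = 1 := by omega
      have hbx := pvAxisB m ((n' + 1) / 2) 0 (by omega) (by omega) ((n' : Int) - 2) (by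
        push_cast
        omega)
      have hby := pvAxisB m (n' / 2) 1 (by omega) (by omega) ((n' : Int) - 1) (by
        push_cast
        omega)
      simp only [] at hbx hby
      simp only [hpar1, Nat.cast_one, if_true,
        if_neg (by norm_num : ¬ ((1 : Int) = 0))]
      rw [hbx, hby]
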